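-- pv_equiv track=rewrite | github.com/moo-on/Algorithm | programmers/problems/모든문제/문자열최적화.py | solution
-- ===== SOURCE A (Python) =====
-- from collections import defaultdict
--
-- def solution(s):
--     str_dict = defaultdict(int)
--
--     for e in s:
--         str_dict[e] += 1
--
--     lst = [0 for _ in range(1 + max(str_dict.values()))]
--
--     for i, e in str_dict.items():
--         lst[e] += 1
--
--     lst.reverse()
--
--     cnt = 0
--
--     for i, e in enumerate(lst):
--         if i == len(lst) - 1:
--             continue
--         if e > 1:
--             over = lst[i] - 1
--             lst[i + 1] += over
--             cnt += over
--
--     return cnt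
-- ===== SOURCE B (Python) =====
-- from collections import Counter
--
-- def solution(s):
--     # sort the character frequencies in descending order, then greedily cap each
--     # frequency below the previous kept one, counting the forced decrements
--     cnt = 0
--     cap = len(s)
--     for f in sorted(Counter(s).values(), reverse=True):
--         take = min(f, cap)
--         cnt += f - take
--         cap = max(take - 1, 0)
--     return cnt
-- ===== Notes on version B (the rewrite author's own statement) =====
-- stated objective: faster
-- what changed: Replaces A's frequency-of-frequencies bucket array (size = max frequency) with reverse and in-place carry cascade by sorting the k distinct-character frequencies in descending order and doing one greedy pass with a running cap, summing the forced decrements.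
-- outside the precondition, e.g. on solution(''): A raises ValueError, B returns 0
-- crash fix: On the empty string A raises ValueError (max() of an empty sequence); B naturally returns 0. — e.g. on solution(""): A raises ValueError, B returns 0
import Mathlib
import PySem

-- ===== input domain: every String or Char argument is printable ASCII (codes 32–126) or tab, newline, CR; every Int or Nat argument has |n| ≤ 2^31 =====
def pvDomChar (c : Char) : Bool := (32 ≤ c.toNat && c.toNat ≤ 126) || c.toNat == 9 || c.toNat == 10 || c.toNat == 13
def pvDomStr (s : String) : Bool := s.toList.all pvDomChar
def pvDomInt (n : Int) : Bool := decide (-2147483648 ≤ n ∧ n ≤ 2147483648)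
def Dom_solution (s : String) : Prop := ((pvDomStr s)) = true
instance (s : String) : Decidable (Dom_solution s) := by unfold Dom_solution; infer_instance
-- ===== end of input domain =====

-- B replaces A's frequency-of-frequencies bucket array + reverse + carry cascade by one
-- greedy pass (descending sort of the frequencies, running cap); same return value on
-- every non-empty string (A raises ValueError on "", excluded by Pre_solution).

-- ===== PORT A =====
def solution (s : String) : Int :=
  let d := s.toList.foldl (fun d e => d.modify e 0 (· + 1)) PySem.Dict.empty
  match PySem.List.max? d.values (fun v => v) with
  | none => 0  -- Python raises ValueError here (only for s = ""); excluded by Pre_solution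
  | some mx =>
    let lst0 := (PySem.List.pyRange 0 (1 + mx) 1).map (fun _ => (0 : Int))
    let lst1 := d.items.foldl
      (fun l p => PySem.List.pySetD l p.2 (PySem.List.pyGetD l p.2 0 + 1)) lst0
    let lst2 := lst1.reverse
    let n := lst2.length
    let r := (PySem.List.pyRange 0 (n : Int) 1).foldl (fun (st : List Int × Int) i =>
      if i == (n : Int) - 1 then st
      else
        let e := PySem.List.pyGetD st.1 i 0
        if e > 1 then
          let ov := PySem.List.pyGetD st.1 i 0 - 1
          (PySem.List.pySetD st.1 (i + 1) (PySem.List.pyGetD st.1 (i + 1) 0 + ov),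
           st.2 + ov)
        else st) (lst2, 0)
    r.2

-- ===== PORT B =====
def solution_alt (s : String) : Int :=
  let freqs := PySem.List.sorted (PySem.Dict.counter s.toList).values (fun v => v) true
  (freqs.foldl (fun (st : Int × Int) f =>
      let take := min f st.2
      (st.1 + (f - take), max (take - 1) 0)) ((0 : Int), PySem.Str.len s)).1

-- ===== PRECONDITION & SPEC =====
def Pre_solution (s : String) : Prop := s ≠ ""
instance (s : String) : Decidable (Pre_solution s) := by unfold Pre_solution; infer_instance
def pvWitness_solution : String := "aabbc"

-- On the empty string A raises ValueError (max() of an empty sequence); B returns 0.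
def Raises_solution (s : String) : Prop := s = ""
instance (s : String) : Decidable (Raises_solution s) := by unfold Raises_solution; infer_instance
def pvRaiseWitness_solution : String := ""
def pvRaiseWitnessOut_solution : Int := 0

def Spec_solution (s : String) (out : Int) : Prop := out = solution_alt s
instance (s : String) (out : Int) : Decidable (Spec_solution s out) := by unfold Spec_solution; infer_instance

-- ===== CLAIM (what is proved, stated in full; the proofs are below) =====
def Claim_equal_solution : Prop := ∀ (s : String), Dom_solution s → Pre_solution s → Spec_solution s (solution s)
def Claim_raises_solution : Prop := (∀ (s : String), Dom_solution s → Raises_solution s → ¬ Pre_solution s) ∧ (Dom_solution (pvRaiseWitness_solution) ∧ Raises_solution (pvRaiseWitness_solution) ∧ solution_alt (pvRaiseWitness_solution) = pvRaiseWitnessOut_solution)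

-- ===== LEMMAS AND PROOFS =====

def pvCasc : List Int → Int → Int
  | [], _ => 0
  | x :: t, c =>
    let o := if x + c > 1 then x + c - 1 else 0
    o + pvCasc t o

def pvGreedy : List Int → Int → Int
  | [], _ => 0
  | f :: t, cap => (f - min f cap) + pvGreedy t (max (min f cap - 1) 0)

def pvE (c : Int) (F : Nat) : Int := ∑ i ∈ Finset.range c.toNat, min (i : Int) (F : Int)

theorem pvE_zero_right (c : Int) : pvE c 0 = 0 := by
  unfold pvE
  apply Finset.sum_eq_zero
  intro i _
  simp

theorem pvE_zero_left (F : Nat) : pvE 0 F = 0 := by simp [pvE]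

theorem pvE_succ (c : Int) (F : Nat) (hc : 0 ≤ c) :
    pvE (c + 1) F = pvE c F + min c (F : Int) := by
  unfold pvE
  have h : (c + 1).toNat = c.toNat + 1 := by omega
  rw [h, Finset.sum_range_succ]
  congr 1
  congr 1
  omega

theorem pvE_down (c : Int) (F : Nat) (hc : 0 ≤ c) :
    pvE c (F + 1) = max (c - 1) 0 + pvE (max (c - 1) 0) F := by
  rcases eq_or_lt_of_le hc with h | h
  · simp [← h, pvE]
  · have h1 : max (c - 1) 0 = c - 1 := by omega
    rw [h1]
    unfold pvE
    have h2 : c.toNat = (c - 1).toNat + 1 := by omega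
    rw [h2, Finset.sum_range_succ']
    have h3 : ∀ i ∈ Finset.range (c - 1).toNat,
        min ((i + 1 : Nat) : Int) (((F + 1 : Nat) : Int)) = min (i : Int) (F : Int) + 1 := by
      intro i _
      push_cast
      omega
    rw [Finset.sum_congr rfl h3]
    rw [Finset.sum_add_distrib]
    simp
    omega

theorem pvGreedy_sat (l : List Int) (M : Int) (h : ∀ v ∈ l, v ≤ M) :
    ∀ cap₁ cap₂, M ≤ cap₁ → M ≤ cap₂ → pvGreedy l cap₁ = pvGreedy l cap₂ := by
  induction l with
  | nil => intro _ _ _ _; rfl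
  | cons f t ih =>
    intro cap₁ cap₂ h1 h2
    have hf : f ≤ M := h f (by simp)
    unfold pvGreedy
    rw [min_eq_left (by omega), min_eq_left (by omega)]

theorem pvGreedy_repl (k : Nat) :
    ∀ (v cap : Int) (t : List Int), 0 ≤ cap → cap ≤ v →
    pvGreedy (List.replicate k v ++ t) cap
      = (∑ j ∈ Finset.range k, (v - max (cap - (j : Int)) 0)) +
        pvGreedy t (max (cap - (k : Int)) 0) := by
  induction k with
  | zero => intro v cap t h0 h1; simp [max_eq_left h0]
  | succ k ih =>
    intro v cap t h0 h1
    rw [List.replicate_succ, List.cons_append]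
    show (v - min v cap) + pvGreedy (List.replicate k v ++ t) (max (min v cap - 1) 0) = _
    rw [min_eq_right h1]
    have hc : 0 ≤ max (cap - 1) 0 := le_max_right _ _
    have hcv : max (cap - 1) 0 ≤ v := by omega
    rw [ih v (max (cap - 1) 0) t hc hcv]
    have hs : ∀ j ∈ Finset.range k,
        v - max (max (cap - 1) 0 - (j : Int)) 0 = v - max (cap - ((j + 1 : Nat) : Int)) 0 := by
      intro j hj
      have hj0 : (0:Int) ≤ (j:Int) := Int.natCast_nonneg j
      push_cast
      omega
    rw [Finset.sum_congr rfl hs]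
    have ht : max (max (cap - 1) 0 - (k : Int)) 0 = max (cap - ((k + 1 : Nat) : Int)) 0 := by
      have hk0 : (0:Int) ≤ (k:Int) := Int.natCast_nonneg k
      push_cast
      omega
    rw [ht, Finset.sum_range_succ']
    have h00 : v - max (cap - ((0 : Nat) : Int)) 0 = v - cap := by
      push_cast
      omega
    rw [h00]
    ring

theorem pvPerLevel (k : Nat) : ∀ (c : Int) (F : Nat), 0 ≤ c →
    (∑ j ∈ Finset.range k,
        (((F : Int) + 1) - max (max ((F : Int) + 1 - c) 0 - (j : Int)) 0)) + pvE c (F + 1)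
      = max ((k : Int) + c - 1) 0 + pvE (max ((k : Int) + c - 1) 0) F := by
  induction k with
  | zero =>
    intro c F hc
    simp only [Finset.range_zero, Finset.sum_empty, zero_add, Nat.cast_zero, zero_add]
    rw [pvE_down c F hc]
  | succ k ih =>
    intro c F hc
    rw [Finset.sum_range_succ]
    rw [add_right_comm, ih c F hc]
    by_cases h1 : 1 ≤ (k : Int) + c
    · have hk0 : (0:Int) ≤ (k:Int) := Int.natCast_nonneg k
      have ho : max ((k : Int) + c - 1) 0 = (k : Int) + c - 1 := by omega
      have ho' : max (((k+1 : Nat) : Int) + c - 1) 0 = ((k : Int) + c - 1) + 1 := by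
        push_cast; omega
      rw [ho, ho', pvE_succ _ F (by omega)]
      have harith : ((F : Int) + 1) - max (max ((F : Int) + 1 - c) 0 - (k : Int)) 0
          = 1 + min ((k : Int) + c - 1) (F : Int) := by omega
      omega
    · have hk0 : (0:Int) ≤ (k:Int) := Int.natCast_nonneg k
      have hk : (k : Int) = 0 ∧ c = 0 := by omega
      obtain ⟨hk1, hk2⟩ := hk
      rw [hk1, hk2]
      have h1 : max ((0:Int) + 0 - 1) 0 = 0 := by omega
      have h2 : max (((k+1 : Nat) : Int) + 0 - 1) 0 = 0 := by push_cast; omega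
      rw [h1, h2]
      have h3 : ((F : Int) + 1) - max (max ((F : Int) + 1 - 0) 0 - (0:Int)) 0 = 0 := by
        have : (0:Int) ≤ (F:Int) := Int.natCast_nonneg F
        omega
      rw [h3]
      ring

theorem pvDecomp (l : List Int) (v : Int) :
    l.Pairwise (fun a b => b ≤ a) → (∀ x ∈ l, x ≤ v) →
    ∃ t, l = List.replicate (l.count v) v ++ t ∧ t.Pairwise (fun a b => b ≤ a) ∧
      (∀ x ∈ t, x ≤ v - 1) ∧ (∀ x ∈ t, x ∈ l) ∧ ∀ x : Int, x ≠ v → t.count x = l.count x := by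
  induction l with
  | nil => intro _ _; exact ⟨[], by simp⟩
  | cons a r ih =>
    intro hp hle
    have hpr : r.Pairwise (fun a b => b ≤ a) := hp.of_cons
    have har : ∀ x ∈ r, x ≤ a := by
      intro x hx
      exact List.rel_of_pairwise_cons hp hx
    by_cases ha : a = v
    · subst ha
      obtain ⟨t, h1, h2, h3, h4, h5⟩ := ih hpr (fun x hx => hle x (by simp [hx]))
      refine ⟨t, ?_, h2, h3, fun x hx => by simp [h4 x hx], ?_⟩
      · rw [List.count_cons_self, List.replicate_succ, List.cons_append]
        rw [← h1]
      · intro x hx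
        rw [h5 x hx]
        have hax : ¬ (a = x) := fun h => hx h.symm
        simp [hax]
    · refine ⟨a :: r, ?_, hp, ?_, fun x hx => hx, fun x hx => rfl⟩
      · have hcnt : (a :: r).count v = 0 := by
          rw [List.count_eq_zero]
          intro hv
          rcases List.mem_cons.mp hv with h | h
          · exact ha h.symm
          · have h6 := har v h
            have h7 := hle a (by simp)
            omega
        rw [hcnt]
        simp
      · intro x hx
        have hxv : x ≤ v := hle x hx
        rcases List.mem_cons.mp hx with h | h
        · subst h
          omega
        · have h6 := har x h
          have h7 := hle a (by simp)
          omega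

theorem pvMain (F : Nat) : ∀ (c : Int) (l : List Int), 0 ≤ c →
    l.Pairwise (fun a b => b ≤ a) → (∀ v ∈ l, 1 ≤ v ∧ v ≤ (F : Int)) →
    pvCasc ((List.range F).map (fun (i : Nat) => (l.count ((F : Int) - (i : Int)) : Int))) c
      = pvGreedy l (max ((F : Int) - c) 0) + pvE c F := by
  induction F with
  | zero =>
    intro c l hc hp hb
    have hl : l = [] := by
      cases l with
      | nil => rfl
      | cons x t =>
        have := hb x (by simp)
        simp at this
        omega
    subst hl
    simp [pvCasc, pvGreedy, pvE_zero_right]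
  | succ F ih =>
    intro c l hc hp hb
    obtain ⟨t, hdec, htp, htle, htmem, htcnt⟩ :=
      pvDecomp l (((F + 1 : Nat) : Int)) hp (fun x hx => (hb x hx).2)
    set k := l.count (((F + 1 : Nat) : Int)) with hk
    -- bucket list decomposition
    have hbuck : (List.range (F + 1)).map
        (fun (i : Nat) => (l.count (((F + 1 : Nat) : Int) - (i : Int)) : Int))
        = ((k : Nat) : Int) :: (List.range F).map
            (fun (i : Nat) => (t.count ((F : Int) - (i : Int)) : Int)) := by
      rw [List.range_succ_eq_map, List.map_cons, List.map_map]
      congr 1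
      · simp
        intro a ha
        have ha0 : (0:Int) ≤ (a:Int) := Int.natCast_nonneg a
        have hne : ((F : Int) - (a : Int)) ≠ ((F + 1 : Nat) : Int) := by push_cast; omega
        rw [htcnt _ hne]
    rw [hbuck]
    -- cascade step
    have hkc : (0:Int) ≤ (k : Int) + c := by
      have := Int.natCast_nonneg k
      omega
    show (let o := if (k : Int) + c > 1 then (k : Int) + c - 1 else 0;
          o + pvCasc ((List.range F).map (fun (i : Nat) => (t.count ((F : Int) - (i : Int)) : Int))) o) = _
    have ho : (if (k : Int) + c > 1 then (k : Int) + c - 1 else 0) = max ((k : Int) + c - 1) 0 := by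
      split_ifs with h <;> omega
    simp only [ho]
    set o := max ((k : Int) + c - 1) 0 with hodef
    have ho0 : 0 ≤ o := le_max_right _ _
    have htb : ∀ v ∈ t, 1 ≤ v ∧ v ≤ (F : Int) := by
      intro v hv
      have h1 := (hb v (htmem v hv)).1
      have h2 := htle v hv
      push_cast at h2
      exact ⟨h1, by omega⟩
    rw [ih o t ho0 htp htb]
    -- greedy side
    have hcap0 : (0:Int) ≤ max (((F + 1 : Nat) : Int) - c) 0 := le_max_right _ _
    have hcapv : max (((F + 1 : Nat) : Int) - c) 0 ≤ ((F + 1 : Nat) : Int) := by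
      push_cast
      omega
    rw [hdec]
    rw [pvGreedy_repl k (((F + 1 : Nat) : Int)) _ t hcap0 hcapv]
    by_cases h1 : 1 ≤ (k : Int) + c
    · -- tails agree because the caps agree
      have htail : max (max (((F + 1 : Nat) : Int) - c) 0 - (k : Int)) 0
          = max ((F : Int) - o) 0 := by
        have hk0 : (0:Int) ≤ (k:Int) := Int.natCast_nonneg k
        push_cast
        omega
      rw [htail]
      have hper := pvPerLevel k c F hc
      push_cast at hper ⊢
      rw [← hodef] at hper
      omega
    · have hk0 : (0:Int) ≤ (k:Int) := Int.natCast_nonneg k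
      have hc0 : c = 0 := by omega
      have hknat : k = 0 := by
        have : (k:Int) = 0 := by omega
        exact_mod_cast this
      have hoz : o = 0 := by rw [hodef, hknat, hc0]; simp
      have hFc : (0:Int) ≤ (F:Int) := Int.natCast_nonneg F
      have hsat := pvGreedy_sat t (F : Int) (fun v hv => (htb v hv).2)
        (max ((F : Int) - o) 0)
        (max (max (((F + 1 : Nat) : Int) - c) 0 - (k : Int)) 0)
        (by rw [hoz]; omega)
        (by rw [hc0, hknat]; push_cast; omega)
      rw [hsat, hc0, hoz, hknat]
      simp [pvE_zero_left]

theorem pvGreedyFold (l : List Int) : ∀ (cnt cap : Int),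
    (l.foldl (fun (st : Int × Int) f =>
        let take := min f st.2
        (st.1 + (f - take), max (take - 1) 0)) (cnt, cap)).1 = cnt + pvGreedy l cap := by
  induction l with
  | nil => intro cnt cap; simp [pvGreedy]
  | cons f t ih =>
    intro cnt cap
    rw [List.foldl_cons]
    show (t.foldl _ (cnt + (f - min f cap), max (min f cap - 1) 0)).1 = _
    rw [ih]
    show cnt + (f - min f cap) + pvGreedy t (max (min f cap - 1) 0) = _
    conv_rhs => rw [pvGreedy]
    ring

theorem pvCascHeadAdd (y o : Int) (r : List Int) :
    pvCasc ((y + o) :: r) 0 = pvCasc (y :: r) o := by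
  show (let o' := if (y + o) + 0 > 1 then (y + o) + 0 - 1 else 0; o' + pvCasc r o')
      = (let o' := if y + o > 1 then y + o - 1 else 0; o' + pvCasc r o')
  norm_num

theorem pvGetDAppend {α : Type} [Inhabited α] (pre : List α) (l : List α) (n : Nat) (d : α) :
    (pre ++ l).getD (pre.length + n) d = l.getD n d := by
  induction pre with
  | nil => simp
  | cons a p ih =>
    simp only [List.cons_append, List.length_cons]
    rw [show p.length + 1 + n = (p.length + n) + 1 by omega]
    simpa using ih

theorem pvSetAppend {α : Type} (pre : List α) (l : List α) (n : Nat) (v : α) :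
    (pre ++ l).set (pre.length + n) v = pre ++ l.set n v := by
  induction pre with
  | nil => simp
  | cons a p ih =>
    simp only [List.cons_append, List.length_cons]
    rw [show p.length + 1 + n = (p.length + n) + 1 by omega]
    simp [ih]

theorem pvBuck (ws : List Int) : ∀ (l : List Int), (∀ w ∈ ws, 0 ≤ w ∧ w < (l.length : Int)) →
    (ws.foldl (fun l v => PySem.List.pySetD l v (PySem.List.pyGetD l v 0 + 1)) l).length = l.length ∧
    ∀ j : Nat, j < l.length →
      (ws.foldl (fun l v => PySem.List.pySetD l v (PySem.List.pyGetD l v 0 + 1)) l).getD j 0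
        = l.getD j 0 + (ws.count ((j : Nat) : Int) : Int) := by
  induction ws with
  | nil => intro l _; simp
  | cons w ws ih =>
    intro l hb
    obtain ⟨hw0, hwlt⟩ := hb w (by simp)
    have hset : PySem.List.pySetD l w (PySem.List.pyGetD l w 0 + 1)
        = l.set w.toNat (l.getD w.toNat 0 + 1) := by
      rw [PySem.List.pySetD_of_nonneg l _ hw0,
          PySem.List.pyGetD_eq_getElem l 0 hw0 hwlt]
      congr 1
      rw [List.getD_eq_getElem l 0 (by omega)]
    have hlen : (l.set w.toNat (l.getD w.toNat 0 + 1)).length = l.length := by simp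
    have hb' : ∀ w' ∈ ws, 0 ≤ w' ∧ w' < ((l.set w.toNat (l.getD w.toNat 0 + 1)).length : Int) := by
      intro w' hw'
      rw [hlen]
      exact hb w' (by simp [hw'])
    obtain ⟨ih1, ih2⟩ := ih _ hb'
    rw [List.foldl_cons, hset]
    refine ⟨by rw [ih1, hlen], ?_⟩
    intro j hj
    rw [ih2 j (by rw [hlen]; exact hj)]
    have hcnt : ((w :: ws).count ((j : Nat) : Int) : Int)
        = (ws.count ((j : Nat) : Int) : Int) + (if w = ((j : Nat) : Int) then 1 else 0) := by
      rw [List.count_cons]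
      by_cases h : w = ((j : Nat) : Int)
      · simp [h]
      · simp [beq_iff_eq, h]
    have hget : (l.set w.toNat (l.getD w.toNat 0 + 1)).getD j 0
        = l.getD j 0 + (if w = ((j : Nat) : Int) then 1 else 0) := by
      by_cases hjw : j = w.toNat
      · subst hjw
        rw [if_pos (by omega)]
        rw [List.getD_eq_getElem _ 0 (by simpa using hj), List.getElem_set_self (by omega)]
      · rw [if_neg (by omega)]
        rw [List.getD_eq_getElem _ 0 (by simpa using hj), List.getElem_set_ne (by omega)]
        rw [List.getD_eq_getElem l 0 hj]
        simp
    rw [hget, hcnt]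
    ring

theorem pvFoldRun (n m : Nat) : ∀ (suf pre : List Int) (cnt : Int), suf.length = m → suf ≠ [] →
    n = pre.length + suf.length →
    ((PySem.List.pyRange ((pre.length : Nat) : Int) ((n : Nat) : Int) 1).foldl
      (fun (st : List Int × Int) i =>
        if i == ((n : Nat) : Int) - 1 then st
        else
          let e := PySem.List.pyGetD st.1 i 0
          if e > 1 then
            let ov := PySem.List.pyGetD st.1 i 0 - 1
            (PySem.List.pySetD st.1 (i + 1) (PySem.List.pyGetD st.1 (i + 1) 0 + ov),
             st.2 + ov)
          else st)
      (pre ++ suf, cnt)).2 = cnt + pvCasc suf.dropLast 0 := by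
  induction m with
  | zero =>
    intro suf pre cnt hlen hne _
    cases suf with
    | nil => exact absurd rfl hne
    | cons a b => simp at hlen
  | succ m ih =>
    intro suf pre cnt hlen hne hn
    obtain ⟨x, rest, rfl⟩ : ∃ a b, suf = a :: b := by
      cases suf with
      | nil => exact absurd rfl hne
      | cons a b => exact ⟨a, b, rfl⟩
    have hlt : (pre.length : Int) < (n : Int) := by
      simp only [List.length_cons] at hn
      omega
    rw [PySem.List.pyRange_one_cons hlt, List.foldl_cons]
    cases rest with
    | nil =>
      -- last index: the loop body skips it
      have hlast : ((pre.length : Int) == ((n : Nat) : Int) - 1) = true := by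
        rw [beq_iff_eq]
        simp only [List.length_cons, List.length_nil] at hn
        omega
      rw [if_pos hlast]
      have hnil : PySem.List.pyRange ((pre.length : Int) + 1) ((n : Nat) : Int) 1 = [] := by
        have : ((n : Nat) : Int) = (pre.length : Int) + 1 := by
          simp only [List.length_cons, List.length_nil] at hn
          omega
        rw [this]
        simp [PySem.List.pyRange]
      rw [hnil, List.foldl_nil]
      simp [pvCasc]
    | cons y t =>
      have hne : ((pre.length : Int) == ((n : Nat) : Int) - 1) = false := by
        rw [beq_eq_false_iff_ne]
        simp only [List.length_cons] at hn
        omega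
      rw [if_neg (by simp [hne])]
      have hgetx : PySem.List.pyGetD (pre ++ x :: y :: t) ((pre.length : Nat) : Int) 0 = x := by
        rw [PySem.List.pyGetD_natCast]
        rw [show pre.length = pre.length + 0 by omega, pvGetDAppend]
        rfl
      have hgety : PySem.List.pyGetD (pre ++ x :: y :: t) (((pre.length : Nat) : Int) + 1) 0 = y := by
        rw [show ((pre.length : Nat) : Int) + 1 = (((pre.length + 1 : Nat)) : Int) by push_cast; ring]
        rw [PySem.List.pyGetD_natCast]
        rw [show pre.length + 1 = pre.length + 1 by rfl, pvGetDAppend]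
        rfl
      have hstart : ((pre.length : Nat) : Int) + 1 = (((pre ++ [x]).length : Nat) : Int) := by
        simp
      have hn' : n = (pre ++ [x]).length + (y :: t).length := by
        simp only [List.length_append, List.length_cons, List.length_nil] at hn ⊢
        omega
      simp only [hgetx, hgety]
      by_cases hx : x > 1
      · rw [if_pos hx]
        have hset : PySem.List.pySetD (pre ++ x :: y :: t) (((pre.length : Nat) : Int) + 1) (y + (x - 1))
            = (pre ++ [x]) ++ (y + (x - 1)) :: t := by
          rw [show ((pre.length : Nat) : Int) + 1 = (((pre.length + 1 : Nat)) : Int) by push_cast; ring]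
          rw [PySem.List.pySetD_natCast]
          rw [show pre.length + 1 = pre.length + 1 by rfl, pvSetAppend]
          simp
        show ((PySem.List.pyRange ((pre.length : Int) + 1) ((n : Nat) : Int) 1).foldl _
          (PySem.List.pySetD (pre ++ x :: y :: t) (((pre.length : Nat) : Int) + 1) (y + (x - 1)),
           cnt + (x - 1))).2 = _
        rw [hset, hstart]
        rw [ih ((y + (x - 1)) :: t) (pre ++ [x]) (cnt + (x - 1)) (by simp only [List.length_cons] at hlen ⊢; omega) (by simp) hn']
        have hdl : (x :: y :: t).dropLast = x :: (y :: t).dropLast := by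
          simp [List.dropLast]
        rw [hdl]
        conv_rhs => rw [pvCasc]
        have ho : (if x + 0 > 1 then x + 0 - 1 else 0) = x - 1 := by
          rw [if_pos (by omega)]
          ring
        simp only [ho]
        cases t with
        | nil => simp [pvCasc]
        | cons z t' =>
          have h1 : ((y + (x - 1)) :: z :: t').dropLast = (y + (x - 1)) :: (z :: t').dropLast := by
            simp [List.dropLast]
          have h2 : (y :: z :: t').dropLast = y :: (z :: t').dropLast := by
            simp [List.dropLast]
          rw [h1, h2, pvCascHeadAdd y (x - 1) ((z :: t').dropLast)]
          ring
      · rw [if_neg hx]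
        show ((PySem.List.pyRange ((pre.length : Int) + 1) ((n : Nat) : Int) 1).foldl _
          (pre ++ x :: y :: t, cnt)).2 = _
        rw [show pre ++ x :: y :: t = (pre ++ [x]) ++ y :: t by simp, hstart]
        rw [ih (y :: t) (pre ++ [x]) cnt (by simp only [List.length_cons] at hlen ⊢; omega) (by simp) hn']
        have hdl : (x :: y :: t).dropLast = x :: (y :: t).dropLast := by
          simp [List.dropLast]
        rw [hdl]
        conv_rhs => rw [pvCasc]
        have ho : (if x + 0 > 1 then x + 0 - 1 else 0) = 0 := by
          rw [if_neg (by omega)]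
        simp only [ho]
        ring

-- ===== VERDICT (by name: the statement is the Claim_ definition above) =====
theorem pvValuesChar (s : String) :
    (PySem.Dict.counter s.toList).values
      = (PySem.Set.ofList s.toList).map (fun k => (s.toList.count k : Int)) := by
  rw [PySem.Dict.values_eq_map_keys _ (PySem.Dict.nodup_keys_counter s.toList) 0]
  rw [PySem.Dict.keys_counter]
  apply List.map_congr_left
  intro k _
  exact PySem.Dict.getD_counter s.toList k

theorem pvSolutionA (s : String) (mx : Int)
    (hmx : PySem.List.max? (PySem.Dict.counter s.toList).values (fun v => v) = some mx)
    (hmx1 : 1 ≤ mx)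
    (hpos : ∀ v ∈ (PySem.Dict.counter s.toList).values, 1 ≤ v)
    (hmxmax : ∀ v ∈ (PySem.Dict.counter s.toList).values, v ≤ mx) :
    solution s = pvCasc ((List.range mx.toNat).map
      (fun (i : Nat) => ((PySem.Dict.counter s.toList).values.count ((mx.toNat : Int) - (i : Int)) : Int))) 0 := by
  simp only [solution]
  rw [← PySem.Dict.counter_eq_foldl]
  rw [hmx]
  have hL : (1 : Int) + mx = ((mx.toNat + 1 : Nat) : Int) := by push_cast; omega
  have h0 : (PySem.List.pyRange 0 (1 + mx) 1).map (fun _ => (0:Int))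
      = List.replicate (mx.toNat + 1) 0 := by
    rw [hL, PySem.List.pyRange_zero_natCast, List.map_map]
    show (List.range (mx.toNat + 1)).map (fun _ => (0:Int)) = _
    rw [List.map_const']
    simp
  simp only [h0]
  have hitems : (PySem.Dict.counter s.toList).items.foldl
      (fun l p => PySem.List.pySetD l p.2 (PySem.List.pyGetD l p.2 0 + 1))
      (List.replicate (mx.toNat + 1) (0 : Int))
      = (PySem.Dict.counter s.toList).values.foldl
        (fun l v => PySem.List.pySetD l v (PySem.List.pyGetD l v 0 + 1))
        (List.replicate (mx.toNat + 1) (0 : Int)) := by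
    rw [show (PySem.Dict.counter s.toList).values
        = (PySem.Dict.counter s.toList).items.map Prod.snd from rfl]
    rw [List.foldl_map]
  rw [hitems]
  have hb : ∀ w ∈ (PySem.Dict.counter s.toList).values,
      0 ≤ w ∧ w < ((List.replicate (mx.toNat + 1) (0 : Int)).length : Int) := by
    intro w hw
    have h1 := hpos w hw
    have h2 := hmxmax w hw
    simp only [List.length_replicate]
    constructor
    · omega
    · push_cast
      omega
  obtain ⟨hlen1, hgetd⟩ := pvBuck (PySem.Dict.counter s.toList).values
    (List.replicate (mx.toNat + 1) (0 : Int)) hb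
  set lst1 := (PySem.Dict.counter s.toList).values.foldl
    (fun l v => PySem.List.pySetD l v (PySem.List.pyGetD l v 0 + 1))
    (List.replicate (mx.toNat + 1) (0 : Int)) with hlst1
  have hlen1' : lst1.length = mx.toNat + 1 := by rw [hlen1]; simp
  have hrevne : lst1.reverse ≠ [] := by
    intro h
    apply_fun List.length at h
    simp [hlen1'] at h
  have hrun := pvFoldRun lst1.reverse.length lst1.reverse.length lst1.reverse [] 0 rfl hrevne
    (by simp)
  simp only [List.nil_append, List.length_nil, Nat.cast_zero] at hrun
  rw [hrun]
  have hchar : lst1.reverse.dropLast = (List.range mx.toNat).map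
      (fun (i : Nat) => ((PySem.Dict.counter s.toList).values.count
        ((mx.toNat : Int) - (i : Int)) : Int)) := by
    apply List.ext_getElem
    · simp [hlen1']
    · intro i h1 h2
      have hiF : i < mx.toNat := by simpa [hlen1'] using h1
      rw [List.getElem_dropLast, List.getElem_reverse]
      rw [List.getElem_map, List.getElem_range]
      have hj : mx.toNat - i < (List.replicate (mx.toNat + 1) (0 : Int)).length := by
        simp
      have hg := hgetd (mx.toNat - i) hj
      rw [← List.getD_eq_getElem lst1 0 (by omega : lst1.length - 1 - i < lst1.length)]
      have hidx : lst1.length - 1 - i = mx.toNat - i := by omega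
      rw [hidx, hg]
      have hcast : ((mx.toNat - i : Nat) : Int) = (mx.toNat : Int) - (i : Int) :=
        Nat.cast_sub (le_of_lt hiF)
      rw [hcast]
      simp
  rw [hchar]
  simp

theorem solution_spec : Claim_equal_solution := by
  intro s _ hpre
  unfold Spec_solution
  have hxs : s.toList ≠ [] := by
    intro h
    exact hpre (String.toList_eq_nil_iff.mp h)
  have hvals := pvValuesChar s
  have hpos : ∀ v ∈ (PySem.Dict.counter s.toList).values, 1 ≤ v := by
    rw [hvals]
    intro v hv
    obtain ⟨k, hk, rfl⟩ := List.mem_map.mp hv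
    have : k ∈ s.toList := (PySem.Set.mem_ofList _ _).mp hk
    have := List.count_pos_iff.mpr this
    omega
  have hlenb : ∀ v ∈ (PySem.Dict.counter s.toList).values, v ≤ (s.toList.length : Int) := by
    rw [hvals]
    intro v hv
    obtain ⟨k, hk, rfl⟩ := List.mem_map.mp hv
    exact_mod_cast List.count_le_length
  have hvne : (PySem.Dict.counter s.toList).values ≠ [] := by
    rw [hvals]
    intro h
    rw [List.map_eq_nil_iff] at h
    cases hxl : s.toList with
    | nil => exact hxs hxl
    | cons a l =>
      have ha : a ∈ PySem.Set.ofList s.toList :=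
        (PySem.Set.mem_ofList s.toList a).mpr (by rw [hxl]; simp)
      rw [h] at ha
      simp at ha
  obtain ⟨mx, hmx⟩ : ∃ mx, PySem.List.max? (PySem.Dict.counter s.toList).values (fun v => v) = some mx := by
    cases hc : PySem.List.max? (PySem.Dict.counter s.toList).values (fun v => v) with
    | none => exact absurd ((PySem.List.max?_eq_none_iff _ _).mp hc) hvne
    | some m => exact ⟨m, rfl⟩
  have hmxmem : mx ∈ (PySem.Dict.counter s.toList).values := PySem.List.max?_mem hmx
  have hmx1 : 1 ≤ mx := hpos mx hmxmem
  have hmxmax : ∀ v ∈ (PySem.Dict.counter s.toList).values, v ≤ mx := PySem.List.max?_isMax hmx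
  have hmxlen : mx ≤ (s.toList.length : Int) := hlenb mx hmxmem
  rw [pvSolutionA s mx hmx hmx1 hpos hmxmax]
  have hBside : solution_alt s = 0 + pvGreedy
      (PySem.List.sorted (PySem.Dict.counter s.toList).values (fun v => v) true)
      ((s.toList.length : Nat) : Int) := by
    simp only [solution_alt]
    rw [PySem.Str.len_eq]
    rw [pvGreedyFold]
  rw [hBside]
  have hperm : (PySem.List.sorted (PySem.Dict.counter s.toList).values (fun v => v) true).Perm
      (PySem.Dict.counter s.toList).values :=
    PySem.List.sorted_perm _ _ _
  have hpair : (PySem.List.sorted (PySem.Dict.counter s.toList).values (fun v => v) true).Pairwise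
      (fun a b => b ≤ a) := by
    simpa using PySem.List.sorted_pairwise_rev (PySem.Dict.counter s.toList).values (fun v => v)
  have hmxInt : ((mx.toNat : Nat) : Int) = mx := by omega
  have hboundsS : ∀ v ∈ PySem.List.sorted (PySem.Dict.counter s.toList).values (fun v => v) true,
      1 ≤ v ∧ v ≤ ((mx.toNat : Nat) : Int) := by
    intro v hv
    have hv' := hperm.mem_iff.mp hv
    exact ⟨hpos v hv', by rw [hmxInt]; exact hmxmax v hv'⟩
  have hmain := pvMain mx.toNat 0
    (PySem.List.sorted (PySem.Dict.counter s.toList).values (fun v => v) true)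
    le_rfl hpair hboundsS
  have hcnt : (List.range mx.toNat).map (fun (i : Nat) =>
        ((PySem.List.sorted (PySem.Dict.counter s.toList).values (fun v => v) true).count
          ((mx.toNat : Int) - (i : Int)) : Int))
      = (List.range mx.toNat).map (fun (i : Nat) =>
        ((PySem.Dict.counter s.toList).values.count ((mx.toNat : Int) - (i : Int)) : Int)) :=
    List.map_congr_left (fun i _ => by rw [hperm.count_eq])
  rw [hcnt] at hmain
  rw [hmain]
  have hcap : max ((mx.toNat : Int) - 0) 0 = mx := by omega
  rw [hcap, pvE_zero_left]
  rw [pvGreedy_sat (PySem.List.sorted (PySem.Dict.counter s.toList).values (fun v => v) true) mx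
    (fun v hv => by rw [← hmxInt]; exact (hboundsS v hv).2) mx ((s.toList.length : Nat) : Int)
    le_rfl hmxlen]
  ring

theorem solution_raises : Claim_raises_solution := by
  unfold Claim_raises_solution
  exact ⟨fun s _ h hp => hp h, by decide⟩

-- self-check: the witness value of the crash-fix block, projected from solution_raises
theorem pvRaisesWitness_ok : solution_alt pvRaiseWitness_solution = pvRaiseWitnessOut_solution :=
  solution_raises.2.2.2
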